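-- pv_equiv track=rewrite | github.com/weshinsley/advent-of-code | 2015/python/d14.py | part2
-- ===== SOURCE A (Python) =====
-- def distances(stats, time):
--     distances = [-1] * len(stats)
--     i = 0
--     for reindeer in stats:
--         (speed, run, rest) = stats[reindeer]
--         dist = int(time / (run + rest)) * speed * run
--         leftover = time % (run + rest)
--         distances[i] = dist + min(leftover, run) * speed
--         i += 1
--     return distances
--
-- def part2(stats, time = 2503):
--     scores = [0] * len(stats)
--     for i in range(1, time + 1):
--         dists = distances(stats, i)
--         best = max(dists)
--         for j in range(len(stats)):
--             if dists[j] == best: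
--                 scores[j] += 1
--     return max(scores)
-- ===== SOURCE B (Python) =====
-- def part2(stats, time = 2503):
--     # Second-by-second simulation: per reindeer keep a running distance, a countdown
--     # timer and a flying flag, instead of re-evaluating a closed-form distance
--     # for every second.
--     if time < 1:
--         return 0   # no race seconds, nobody scores
--     names = list(stats)
--     state = {}
--     for n in names:
--         (speed, run, rest) = stats[n]
--         state[n] = [0, run, True]   # [distance, timer, flying]
--     scores = {n: 0 for n in names}
--     for _ in range(time):
--         for n in names:
--             (speed, run, rest) = stats[n]
--             st = state[n]
--             if st[2]:
--                 st[0] += speed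
--             st[1] -= 1
--             if st[1] == 0:
--                 st[2] = not st[2]
--                 st[1] = run if st[2] else rest
--         best = max(st[0] for st in state.values())
--         for n in names:
--             if state[n][0] == best:
--                 scores[n] += 1
--     return max(scores.values())
-- ===== Notes on version B (the rewrite author's own statement) =====
-- stated objective: alternative
-- what changed: Replaces the closed-form distances() recomputed for every second with a stateful second-by-second simulation that maintains, per reindeer, a running distance, a countdown timer and a flying flag.
-- outside the precondition, e.g. on part2({'a': (7, 0, 3), 'b': (10, 1, 1)}, 2): A returns 2, B returns 1; on part2({'a': (5, 1, -3), 'b': (3, 1, 1)}, 3): A returns 3, B returns 2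
import Mathlib
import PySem

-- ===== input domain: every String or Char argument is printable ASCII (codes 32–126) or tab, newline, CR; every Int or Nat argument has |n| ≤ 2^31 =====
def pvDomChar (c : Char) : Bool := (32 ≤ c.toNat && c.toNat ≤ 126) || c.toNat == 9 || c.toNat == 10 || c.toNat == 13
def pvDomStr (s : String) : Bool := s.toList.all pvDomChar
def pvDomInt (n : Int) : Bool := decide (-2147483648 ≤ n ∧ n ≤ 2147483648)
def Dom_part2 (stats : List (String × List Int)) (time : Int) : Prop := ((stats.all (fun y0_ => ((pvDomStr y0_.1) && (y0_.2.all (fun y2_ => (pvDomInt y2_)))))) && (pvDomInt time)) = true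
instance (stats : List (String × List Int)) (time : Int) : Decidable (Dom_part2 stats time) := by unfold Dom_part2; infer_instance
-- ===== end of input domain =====

-- B replaces A's per-second re-evaluation of the closed-form distance with a stateful
-- second-by-second simulation (running distance + countdown timer + flying flag per reindeer);
-- objective: alternative (same asymptotic cost, genuinely different algorithm).


-- ===== PORT A =====
-- stats[reindeer]: dict lookup (first match; Pre_ keeps the keys Nodup, so this is the pair's own value)
def pvVal (stats : List (String × List Int)) (name : String) : List Int :=
  ((stats.find? (fun p => p.1 == name)).map Prod.snd).getD []

-- one entry of distances(): '(speed, run, rest) = stats[reindeer]' unpacks a 3-list (Pre_);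
-- 'int(time / (run+rest))' is PySem.Int.truncdiv (exact on Dom's |n| ≤ 2^31 < 2^53)
def pvDistA (stats : List (String × List Int)) (time : Int) (reindeer : String) : Int :=
  let v := pvVal stats reindeer
  let speed := v.getD 0 0
  let run := v.getD 1 0
  let rest := v.getD 2 0
  PySem.Int.truncdiv time (run + rest) * speed * run +
    min (PySem.Int.mod time (run + rest)) run * speed

-- distances(): '[-1]*len' then sequential fill by index = map over the keys in order
def distances (stats : List (String × List Int)) (time : Int) : List Int :=
  (stats.map Prod.fst).map (pvDistA stats time)

-- the body of A's 'for i in range(1, time+1)' loop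
def pvStepA (stats : List (String × List Int)) (scores : List Int) (i : Int) : List Int :=
  let dists := distances stats i
  let best := (PySem.List.max? dists (fun x => x)).getD 0
  List.zipWith (fun s d => if d = best then s + 1 else s) scores dists

def part2 (stats : List (String × List Int)) (time : Int) : Int :=
  let scores := (PySem.List.pyRange 1 (time + 1) 1).foldl (pvStepA stats) (List.replicate stats.length 0)
  (PySem.List.max? scores (fun x => x)).getD 0

-- ===== PORT B =====
-- Source B's per-reindeer one-second update on the state [distance, timer, flying]
def pvStepB (v : List Int) (st : Int × Int × Bool) : Int × Int × Bool :=
  let speed := v.getD 0 0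
  let run := v.getD 1 0
  let rest := v.getD 2 0
  let d := if st.2.2 then st.1 + speed else st.1
  let tmr := st.2.1 - 1
  if tmr = 0 then (d, if !st.2.2 then run else rest, !st.2.2)
  else (d, tmr, st.2.2)

-- one second of Source B's main loop: advance every reindeer, then award the leaders
def pvTickB (stats : List (String × List Int)) (acc : List Int × List (Int × Int × Bool)) :
    List Int × List (Int × Int × Bool) :=
  let states := List.zipWith (fun n st => pvStepB (pvVal stats n) st) (stats.map Prod.fst) acc.2
  let best := (PySem.List.max? (states.map (fun st => st.1)) (fun x => x)).getD 0
  (List.zipWith (fun s st => if st.1 = best then s + 1 else s) acc.1 states, states)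

def part2_alt (stats : List (String × List Int)) (time : Int) : Int :=
  if time < 1 then 0
  else
    let fin := (PySem.List.pyRange 0 time 1).foldl (fun acc _ => pvTickB stats acc)
      (List.replicate stats.length 0,
       (stats.map Prod.fst).map (fun n => ((0 : Int), (pvVal stats n).getD 1 0, true)))
    (PySem.List.max? fin.1 (fun x => x)).getD 0

-- ===== PRECONDITION & SPEC =====
-- Pre_ excludes the inputs where Python A raises (empty dict: max of empty sequence; a value
-- that is not a 3-tuple: unpack ValueError; run+rest = 0 when the loop runs: ZeroDivisionError),
-- duplicate keys (a Python dict cannot carry them), and non-positive run or rest durations,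
-- on which A still returns its closed-form value but a countdown simulation has no meaning.
def Pre_part2 (stats : List (String × List Int)) (time : Int) : Prop :=
  stats ≠ [] ∧ (stats.map Prod.fst).Nodup ∧
    (1 ≤ time → ∀ p ∈ stats, p.2.length = 3 ∧ 1 ≤ p.2.getD 1 0 ∧ 1 ≤ p.2.getD 2 0)
instance (stats : List (String × List Int)) (time : Int) : Decidable (Pre_part2 stats time) := by unfold Pre_part2; infer_instance
def pvWitness_part2 : (List (String × List Int)) × Int :=
  ([("comet", [14, 10, 127]), ("dancer", [16, 11, 162])], 20)

def Spec_part2 (stats : List (String × List Int)) (time : Int) (out : Int) : Prop := out = part2_alt stats time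
instance (stats : List (String × List Int)) (time : Int) (out : Int) : Decidable (Spec_part2 stats time out) := by unfold Spec_part2; infer_instance

-- ===== CLAIM (what is proved, stated in full; the proofs are below) =====
def Claim_equal_part2 : Prop := ∀ (stats : List (String × List Int)) (time : Int), Dom_part2 stats time → Pre_part2 stats time → Spec_part2 stats time (part2 stats time)

-- ===== LEMMAS AND PROOFS =====

-- Closed-form characterisation of B's per-reindeer state after k seconds:
-- with r = k mod cycle, the reindeer is flying iff r < run, its timer is the distance
-- to the next phase change, and its distance is A's closed form.
def pvSim (v : List Int) (k : Nat) : Int × Int × Bool :=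
  let speed := v.getD 0 0
  let run := v.getD 1 0
  let c := run + v.getD 2 0
  let r := (k : Int) % c
  (((k : Int) / c) * speed * run + min r run * speed,
   (if r < run then run - r else c - r), decide (r < run))

theorem pvSim_zero (v : List Int) (h1 : 1 ≤ v.getD 1 0) :
    pvSim v 0 = (0, v.getD 1 0, true) := by
  simp only [pvSim, Nat.cast_zero, Int.zero_emod, Int.zero_ediv, zero_mul, sub_zero]
  rw [min_eq_left (by omega : (0:Int) ≤ v.getD 1 0), if_pos (by omega : (0:Int) < v.getD 1 0)]
  refine Prod.ext ?_ (Prod.ext rfl ?_)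
  · show 0 + 0 * v.getD 0 0 = 0; ring
  · show decide ((0:Int) < v.getD 1 0) = true
    simpa using (by omega : (0:Int) < v.getD 1 0)

-- pure-integer versions of B's step and of the state characterisation (for the proofs)
def pvStepCore (speed run rest : Int) : Int × Int × Bool → Int × Int × Bool
  | (dist, timer, true) =>
      if timer - 1 = 0 then (dist + speed, rest, false) else (dist + speed, timer - 1, true)
  | (dist, timer, false) =>
      if timer - 1 = 0 then (dist, run, true) else (dist, timer - 1, false)

def pvSimCore (speed run rest : Int) (k : Nat) : Int × Int × Bool :=
  let c := run + rest
  let r := (k : Int) % c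
  (((k : Int) / c) * speed * run + min r run * speed,
   (if r < run then run - r else c - r), decide (r < run))

theorem pvStepB_eq_core (v : List Int) (st : Int × Int × Bool) :
    pvStepB v st = pvStepCore (v.getD 0 0) (v.getD 1 0) (v.getD 2 0) st := by
  rcases st with ⟨d, t, f⟩
  cases f <;> rfl

theorem pvSim_eq_core (v : List Int) (k : Nat) :
    pvSim v k = pvSimCore (v.getD 0 0) (v.getD 1 0) (v.getD 2 0) k := rfl

theorem pvSim_step_core (s run rest : Int) (h1 : 1 ≤ run) (h2 : 1 ≤ rest) (k : Nat) :
    pvStepCore s run rest (pvSimCore s run rest k) = pvSimCore s run rest (k + 1) := by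
  simp only [pvSimCore]
  push_cast
  have hcpos : 0 < run + rest := by omega
  have h0r : 0 ≤ (k : Int) % (run + rest) := Int.emod_nonneg _ (by omega)
  have hrc : (k : Int) % (run + rest) < run + rest := Int.emod_lt_of_pos _ hcpos
  have hqr : (run + rest) * ((k : Int) / (run + rest)) + (k : Int) % (run + rest) = (k : Int) :=
    Int.mul_ediv_add_emod _ _
  by_cases hend : (k : Int) % (run + rest) + 1 = run + rest
  · have hcq : (run + rest) * ((k : Int) / (run + rest) + 1)
        = (run + rest) * ((k : Int) / (run + rest)) + (run + rest) := by ring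
    have hkc : (k : Int) + 1 = 0 + (run + rest) * ((k : Int) / (run + rest) + 1) := by omega
    have hm : ((k : Int) + 1) % (run + rest) = 0 := by
      rw [hkc, Int.add_mul_emod_self_left]; simp
    have hd : ((k : Int) + 1) / (run + rest) = (k : Int) / (run + rest) + 1 := by
      rw [hkc, Int.add_mul_ediv_left _ _ (by omega : run + rest ≠ 0)]; simp
    rw [hm, hd]
    by_cases hfly : (k : Int) % (run + rest) < run
    · -- flying at the very end of the cycle: impossible, rest ≥ 1
      exfalso; omega
    · -- resting, last second of rest: flip back to flying with a fresh run timer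
      rw [decide_eq_false hfly, if_neg hfly]
      simp only [pvStepCore]
      rw [if_pos (by omega : (run + rest - (k : Int) % (run + rest)) - 1 = 0)]
      rw [min_eq_right (by omega : run ≤ (k : Int) % (run + rest)),
          min_eq_left (by omega : (0:Int) ≤ run), if_pos (by omega : (0:Int) < run)]
      refine Prod.ext ?_ (Prod.ext ?_ ?_)
      · show (k : Int) / (run + rest) * s * run + run * s
            = ((k : Int) / (run + rest) + 1) * s * run + 0 * s
        ring
      · show run = run - 0; ring
      · show true = decide ((0:Int) < run)
        simp; omega
  · have hkc : (k : Int) + 1 = ((k : Int) % (run + rest) + 1) + (run + rest) * ((k : Int) / (run + rest)) := by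
      omega
    have hm : ((k : Int) + 1) % (run + rest) = (k : Int) % (run + rest) + 1 := by
      rw [hkc, Int.add_mul_emod_self_left, Int.emod_eq_of_lt (by omega) (by omega)]
    have hd : ((k : Int) + 1) / (run + rest) = (k : Int) / (run + rest) := by
      rw [hkc, Int.add_mul_ediv_left _ _ (by omega : run + rest ≠ 0),
          Int.ediv_eq_zero_of_lt (by omega) (by omega)]
      ring
    rw [hm, hd]
    by_cases hfly : (k : Int) % (run + rest) < run
    · rw [decide_eq_true hfly, if_pos hfly]
      simp only [pvStepCore]
      by_cases hlast : (run - (k : Int) % (run + rest)) - 1 = 0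
      · -- last flying second: flip to resting
        rw [if_pos hlast]
        rw [min_eq_left (by omega : (k : Int) % (run + rest) ≤ run),
            min_eq_right (by omega : run ≤ (k : Int) % (run + rest) + 1),
            if_neg (by omega : ¬ ((k : Int) % (run + rest) + 1 < run))]
        refine Prod.ext ?_ (Prod.ext ?_ ?_)
        · show (k : Int) / (run + rest) * s * run + (k : Int) % (run + rest) * s + s
              = (k : Int) / (run + rest) * s * run + run * s
          have hrr : (k : Int) % (run + rest) = run - 1 := by omega
          rw [hrr]; ring
        · show rest = run + rest - ((k : Int) % (run + rest) + 1); omega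
        · show false = decide ((k : Int) % (run + rest) + 1 < run)
          simp; omega
      · rw [if_neg hlast]
        rw [min_eq_left (by omega : (k : Int) % (run + rest) ≤ run),
            min_eq_left (by omega : (k : Int) % (run + rest) + 1 ≤ run),
            if_pos (by omega : (k : Int) % (run + rest) + 1 < run)]
        refine Prod.ext ?_ (Prod.ext ?_ ?_)
        · show (k : Int) / (run + rest) * s * run + (k : Int) % (run + rest) * s + s
              = (k : Int) / (run + rest) * s * run + ((k : Int) % (run + rest) + 1) * s
          ring
        · show (run - (k : Int) % (run + rest)) - 1 = run - ((k : Int) % (run + rest) + 1); ring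
        · show true = decide ((k : Int) % (run + rest) + 1 < run)
          simp; omega
    · rw [decide_eq_false hfly, if_neg hfly]
      simp only [pvStepCore]
      rw [if_neg (by omega : ¬ ((run + rest - (k : Int) % (run + rest)) - 1 = 0))]
      rw [min_eq_right (by omega : run ≤ (k : Int) % (run + rest)),
          min_eq_right (by omega : run ≤ (k : Int) % (run + rest) + 1),
          if_neg (by omega : ¬ ((k : Int) % (run + rest) + 1 < run))]
      refine Prod.ext ?_ (Prod.ext ?_ ?_)
      · rfl
      · show (run + rest - (k : Int) % (run + rest)) - 1
            = run + rest - ((k : Int) % (run + rest) + 1)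
        ring
      · show false = decide ((k : Int) % (run + rest) + 1 < run)
        simp; omega

theorem pvSim_step (v : List Int) (h1 : 1 ≤ v.getD 1 0) (h2 : 1 ≤ v.getD 2 0) (k : Nat) :
    pvStepB v (pvSim v k) = pvSim v (k + 1) := by
  simp only [pvStepB_eq_core, pvSim_eq_core]
  generalize v.getD 0 0 = s
  generalize v.getD 1 0 = run at h1 ⊢
  generalize v.getD 2 0 = rest at h2 ⊢
  exact pvSim_step_core s run rest h1 h2 k

theorem pvSim_dist (v : List Int) (h1 : 1 ≤ v.getD 1 0) (h2 : 1 ≤ v.getD 2 0) (k : Nat) :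
    (pvSim v k).1 = PySem.Int.truncdiv (k : Int) (v.getD 1 0 + v.getD 2 0) * v.getD 0 0 * v.getD 1 0
      + min (PySem.Int.mod (k : Int) (v.getD 1 0 + v.getD 2 0)) (v.getD 1 0) * v.getD 0 0 := by
  have hc : 0 < v.getD 1 0 + v.getD 2 0 := by omega
  rw [PySem.Int.mod_eq_emod_of_pos hc]
  have ht : PySem.Int.truncdiv (k : Int) (v.getD 1 0 + v.getD 2 0) = (k : Int) / (v.getD 1 0 + v.getD 2 0) := by
    simp [PySem.Int.truncdiv]
  rw [ht]
  rfl

-- B's zipWith over the state list is A's zipWith over the projected distance list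
theorem pv_zip_proj (best : Int) (S : List Int) (l : List (Int × Int × Bool)) :
    List.zipWith (fun s st => if st.1 = best then s + 1 else s) S l
      = List.zipWith (fun s d => if d = best then s + 1 else s) S (l.map (fun st => st.1)) := by
  induction l generalizing S with
  | nil => simp
  | cons a t ih => cases S <;> simp [ih]

theorem pv_zip_self_map {α β γ : Type} (f : α → β → γ) (g : α → β) (l : List α) :
    List.zipWith f l (l.map g) = l.map (fun x => f x (g x)) := by
  induction l with
  | nil => rfl
  | cons a t ih => simp [ih]

theorem pvTick_spec (stats : List (String × List Int))
    (H : ∀ n ∈ stats.map Prod.fst, 1 ≤ (pvVal stats n).getD 1 0 ∧ 1 ≤ (pvVal stats n).getD 2 0)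
    (N : Nat) (S : List Int) :
    pvTickB stats (S, (stats.map Prod.fst).map (fun n => pvSim (pvVal stats n) N))
      = (pvStepA stats S ((N : Int) + 1),
         (stats.map Prod.fst).map (fun n => pvSim (pvVal stats n) (N + 1))) := by
  have hstates : List.zipWith (fun n st => pvStepB (pvVal stats n) st) (stats.map Prod.fst)
      ((stats.map Prod.fst).map (fun n => pvSim (pvVal stats n) N))
      = (stats.map Prod.fst).map (fun n => pvSim (pvVal stats n) (N + 1)) := by
    rw [pv_zip_self_map]
    exact List.map_congr_left (fun n hn => pvSim_step _ (H n hn).1 (H n hn).2 N)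
  have hdists : ((stats.map Prod.fst).map (fun n => pvSim (pvVal stats n) (N + 1))).map (fun st => st.1)
      = distances stats ((N : Int) + 1) := by
    rw [List.map_map]
    unfold distances
    apply List.map_congr_left
    intro n hn
    have h := pvSim_dist (pvVal stats n) (H n hn).1 (H n hn).2 (N + 1)
    push_cast at h
    simpa [pvDistA] using h
  simp only [pvTickB, pvStepA, hstates, hdists]
  rw [pv_zip_proj _ S, hdists]

theorem pvLoop (stats : List (String × List Int))
    (H : ∀ n ∈ stats.map Prod.fst, 1 ≤ (pvVal stats n).getD 1 0 ∧ 1 ≤ (pvVal stats n).getD 2 0)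
    (N : Nat) :
    (PySem.List.pyRange 0 (N : Int) 1).foldl (fun acc _ => pvTickB stats acc)
      (List.replicate stats.length 0,
       (stats.map Prod.fst).map (fun n => ((0 : Int), (pvVal stats n).getD 1 0, true)))
      = ((PySem.List.pyRange 1 ((N : Int) + 1) 1).foldl (pvStepA stats) (List.replicate stats.length 0),
         (stats.map Prod.fst).map (fun n => pvSim (pvVal stats n) N)) := by
  induction N with
  | zero =>
    simp only [Nat.cast_zero, PySem.List.pyRange_one_eq_nil (by omega : (0:Int) ≤ 0),
      PySem.List.pyRange_one_eq_nil (by omega : (0:Int) + 1 ≤ 1), List.foldl_nil]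
    refine Prod.ext rfl ?_
    exact (List.map_congr_left (fun n hn => (pvSim_zero _ (H n hn).1).symm))
  | succ N ih =>
    have hB : PySem.List.pyRange 0 ((N + 1 : Nat) : Int) 1
        = PySem.List.pyRange 0 (N : Int) 1 ++ [(N : Int)] := by
      push_cast
      exact PySem.List.pyRange_one_succ_right (by omega)
    have hA : PySem.List.pyRange 1 (((N + 1 : Nat) : Int) + 1) 1
        = PySem.List.pyRange 1 ((N : Int) + 1) 1 ++ [(N : Int) + 1] := by
      push_cast
      exact PySem.List.pyRange_one_succ_right (by omega)
    rw [hB, hA, List.foldl_append, List.foldl_append, ih, List.foldl_cons, List.foldl_nil,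
        List.foldl_cons, List.foldl_nil, pvTick_spec stats H N]

-- keys of stats name values of stats: the dict lookup of a present key is some pair's value
theorem pvVal_spec (stats : List (String × List Int)) (n : String)
    (hn : n ∈ stats.map Prod.fst) : ∃ p ∈ stats, pvVal stats n = p.2 := by
  obtain ⟨p, hp, rfl⟩ := List.mem_map.mp hn
  have hsome : (stats.find? (fun q => q.1 == p.1)).isSome := by
    rw [List.find?_isSome]
    exact ⟨p, hp, by simp⟩
  obtain ⟨q, hq⟩ := Option.isSome_iff_exists.mp hsome
  exact ⟨q, List.mem_of_find?_eq_some hq, by simp [pvVal, hq]⟩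

theorem pv_foldl_max_zero (n : Nat) : (List.replicate n (0 : Int)).foldl max 0 = 0 := by
  induction n with
  | zero => rfl
  | succ m ih => simp [List.replicate_succ, ih]

theorem pv_max_replicate_zero (n : Nat) :
    ((PySem.List.max? (List.replicate n (0 : Int)) (fun x => x)).getD 0) = 0 := by
  cases n with
  | zero => rfl
  | succ m => rw [List.replicate_succ, PySem.List.max?_id_cons]; simp [pv_foldl_max_zero]

-- ===== VERDICT (by name: the statement is the Claim_ definition above) =====
theorem part2_spec : Claim_equal_part2 := by
  intro stats time _ hpre
  unfold Spec_part2
  show part2 stats time = part2_alt stats time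
  by_cases ht : time < 1
  · simp only [part2, part2_alt, if_pos ht,
      PySem.List.pyRange_one_eq_nil (by omega : time + 1 ≤ 1), List.foldl_nil]
    exact pv_max_replicate_zero stats.length
  · have h1 : 1 ≤ time := by omega
    have H : ∀ n ∈ stats.map Prod.fst,
        1 ≤ (pvVal stats n).getD 1 0 ∧ 1 ≤ (pvVal stats n).getD 2 0 := by
      intro n hn
      obtain ⟨p, hp, hv⟩ := pvVal_spec stats n hn
      obtain ⟨-, hr1, hr2⟩ := hpre.2.2 h1 p hp
      exact ⟨by rw [hv]; exact hr1, by rw [hv]; exact hr2⟩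
    have hN : ((time.toNat : Nat) : Int) = time := Int.toNat_of_nonneg (by omega)
    simp only [part2, part2_alt, if_neg ht]
    rw [← hN, pvLoop stats H time.toNat]
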